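-- pv_equiv track=rewrite | github.com/belushkin/30daysleetcodechallenge | keypad_string.py | keypad_string
-- ===== SOURCE A (Python) =====
-- def keypad_string(keys):
--     '''
--     >>> keypad_string("12345")
--     'adgj'
--     >>> keypad_string("4433555555666")
--     'hello'
--     >>> keypad_string("2022")
--     'a b'
--     >>> keypad_string("")
--     ''
--     >>> keypad_string("111")
--     ''
--     >>> keypad_string("7773325550799984466666")
--     'real python'
--     '''
--
--     keypad = {
--             '1': '',
--             '2': 'a',
--             '22': 'b',
--             '222': 'c',
--             '3': 'd',
--             '33': 'e',
--             '333': 'f',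
--             '4': 'g',
--             '44': 'h',
--             '444': 'i',
--             '5': 'j',
--             '55': 'k',
--             '555': 'l',
--             '6': 'm',
--             '66': 'n',
--             '666': 'o',
--             '7': 'p',
--             '77': 'q',
--             '777': 'r',
--             '7777': 's',
--             '8': 't',
--             '88': 'u',
--             '888': 'v',
--             '9': 'w',
--             '99': 'x',
--             '999': 'y',
--             '9999': 'z',
--             '0': ' ',
--             '': ''
--     }
--
--     s = ''
--     res = ''
--     for letter in keys:
--         if len(s) > 0 and (s[-1] != letter or (s+letter) not in keypad):
--             res += keypad[s]
--             s = ''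
--
--         s += letter
--
--     res += keypad[s]
--     return res
-- ===== SOURCE B (Python) =====
-- KEYPAD = {'0': ' ', '1': '', '2': 'abc', '3': 'def', '4': 'ghi',
--           '5': 'jkl', '6': 'mno', '7': 'pqrs', '8': 'tuv', '9': 'wxyz'}
--
--
-- def keypad_string(keys):
--     pieces = []
--     i = 0
--     while i < len(keys):
--         digit = keys[i]
--         letters = KEYPAD[digit]          # KeyError on non-keypad chars, as in A
--         j = i
--         while j < len(keys) and keys[j] == digit:
--             j += 1
--         n = j - i                        # length of this maximal run
--         period = max(len(letters), 1)
--         q, r = divmod(n, period)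
--         if letters:
--             pieces.append(letters[-1] * q)
--         if r:
--             pieces.append(letters[r - 1])
--         i = j
--     return ''.join(pieces)
-- ===== Notes on version B (the rewrite author's own statement) =====
-- stated objective: alternative
-- what changed: A simulates the presses one character at a time with a 29-key run-prefix dictionary and flush-on-break state; B groups the input into maximal runs of each digit and decodes a whole run arithmetically with divmod(run_length, period) against a 10-entry digit->letters table.
import Mathlib
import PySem

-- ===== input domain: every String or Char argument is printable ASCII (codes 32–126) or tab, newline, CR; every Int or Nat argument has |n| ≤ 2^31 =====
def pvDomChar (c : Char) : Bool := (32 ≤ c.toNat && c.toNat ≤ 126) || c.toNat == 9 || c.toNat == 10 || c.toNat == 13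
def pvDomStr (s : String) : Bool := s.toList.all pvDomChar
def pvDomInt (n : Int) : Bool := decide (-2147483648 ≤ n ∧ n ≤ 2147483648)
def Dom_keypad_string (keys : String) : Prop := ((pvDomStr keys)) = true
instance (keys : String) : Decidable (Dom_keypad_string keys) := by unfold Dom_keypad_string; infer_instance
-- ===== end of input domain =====

-- B decodes the presses run-by-run with divmod arithmetic instead of A's char-by-char
-- state machine over a 29-key run-prefix dictionary; same output, same O(n) cost (objective: alternative).

-- ===== PORT A =====
-- A's dict keyed by the pressed-run strings, as lists of chars (PySem.Chars convention).
def pvKeypadA : PySem.Dict (List Char) (List Char) :=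
  PySem.Dict.ofList
    [ (['1'], []), (['2'], ['a']), (['2','2'], ['b']), (['2','2','2'], ['c'])
    , (['3'], ['d']), (['3','3'], ['e']), (['3','3','3'], ['f'])
    , (['4'], ['g']), (['4','4'], ['h']), (['4','4','4'], ['i'])
    , (['5'], ['j']), (['5','5'], ['k']), (['5','5','5'], ['l'])
    , (['6'], ['m']), (['6','6'], ['n']), (['6','6','6'], ['o'])
    , (['7'], ['p']), (['7','7'], ['q']), (['7','7','7'], ['r']), (['7','7','7','7'], ['s'])
    , (['8'], ['t']), (['8','8'], ['u']), (['8','8','8'], ['v'])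
    , (['9'], ['w']), (['9','9'], ['x']), (['9','9','9'], ['y']), (['9','9','9','9'], ['z'])
    , (['0'], [' ']), ([], []) ]

-- the for-loop over keys with state s (current run) and res (output); keypad[s] is getD
-- (the KeyError case, get? = none, is excluded by Pre_keypad_string).
def pvLoopA : List Char → List Char → List Char → List Char
  | [], s, res => res ++ pvKeypadA.getD s []
  | letter :: rest, s, res =>
    if 0 < s.length ∧ (PySem.List.pyGet? s (-1) ≠ some letter ∨ pvKeypadA.get? (s ++ [letter]) = none) then
      pvLoopA rest [letter] (res ++ pvKeypadA.getD s [])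
    else
      pvLoopA rest (s ++ [letter]) res

def keypad_string (keys : String) : String := String.mk (pvLoopA keys.toList [] [])

-- ===== PORT B =====
-- B's 10-entry digit -> letters table.
def pvKeypadB : PySem.Dict Char (List Char) :=
  PySem.Dict.ofList
    [ ('0', [' ']), ('1', []), ('2', ['a','b','c']), ('3', ['d','e','f'])
    , ('4', ['g','h','i']), ('5', ['j','k','l']), ('6', ['m','n','o'])
    , ('7', ['p','q','r','s']), ('8', ['t','u','v']), ('9', ['w','x','y','z']) ]

-- the body of B's outer while loop for one maximal run: run length n, divmod by the period.
def pvRunPieces (c : Char) (n : Nat) : List Char :=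
  let letters := pvKeypadB.getD c []
  let period := max letters.length 1
  let q := n / period
  let r := n % period
  (if letters.isEmpty then [] else List.replicate q (letters.getLastD ' ')) ++
  (if r ≠ 0 then [letters.getD (r - 1) ' '] else [])

-- outer while loop: the inner 'while keys[j] == digit' scan is the takeWhile/dropWhile split.
def pvLoopB : List Char → List Char
  | [] => []
  | c :: t =>
    pvRunPieces c ((t.takeWhile (· == c)).length + 1) ++ pvLoopB (t.dropWhile (· == c))
termination_by l => l.length
decreasing_by
  simp only [List.length_cons]
  exact Nat.lt_succ_of_le (List.length_dropWhile_le _ _)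

def keypad_string_alt (keys : String) : String := String.mk (pvLoopB keys.toList)

-- ===== PRECONDITION & SPEC =====
def pvDigits : List Char := ['0','1','2','3','4','5','6','7','8','9']

-- Pre_ excludes exactly the inputs containing a non-digit character: there Python A
-- raises KeyError (keypad[s] on an unknown run), and B raises KeyError likewise.
def Pre_keypad_string (keys : String) : Prop := keys.toList.all (fun c => pvDigits.contains c) = true
instance (keys : String) : Decidable (Pre_keypad_string keys) := by unfold Pre_keypad_string; infer_instance

def pvWitness_keypad_string : String := "4433555555666"

def Spec_keypad_string (keys : String) (out : String) : Prop := out = keypad_string_alt keys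
instance (keys : String) (out : String) : Decidable (Spec_keypad_string keys out) := by unfold Spec_keypad_string; infer_instance

-- ===== CLAIM (what is proved, stated in full; the proofs are below) =====
def Claim_equal_keypad_string : Prop := ∀ (keys : String), Dom_keypad_string keys → Pre_keypad_string keys → Spec_keypad_string keys (keypad_string keys)

-- ===== LEMMAS AND PROOFS =====

-- letters and period of a digit, as B computes them.
def pvL (c : Char) : List Char := pvKeypadB.getD c []
def pvP (c : Char) : Nat := max (pvL c).length 1

lemma pvBridgeP : ∀ c ∈ pvDigits, 1 ≤ pvP c ∧ pvP c ≤ 4 := by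
  intro c hc; fin_cases hc <;> decide

lemma pvMemK (k : Nat) (h1 : 1 ≤ k) (h4 : k ≤ 4) : k ∈ [1, 2, 3, 4] := by
  interval_cases k <;> simp

-- A's keypad value for a run of k presses of digit c is the (k-1)-th letter of B's table.
lemma pvBridgeEmit : ∀ c ∈ pvDigits, ∀ k ∈ [1, 2, 3, 4], k ≤ pvP c →
    pvKeypadA.getD (List.replicate k c) [] = ((pvL c).drop (k - 1)).take 1 := by
  intro c hc k hk
  fin_cases hc <;> fin_cases hk <;> decide

-- a run of k+1 presses is off A's keypad exactly when k reached the period.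
lemma pvBridgeNone : ∀ c ∈ pvDigits, ∀ k ∈ [1, 2, 3, 4],
    ((pvKeypadA.get? (List.replicate (k + 1) c) = none) ↔ pvP c ≤ k) := by
  intro c hc k hk
  fin_cases hc <;> fin_cases hk <;> decide

lemma pvGetLastReplicate (c : Char) (k : Nat) (hk : 1 ≤ k) :
    (List.replicate k c).getLast? = some c := by
  obtain ⟨m, rfl⟩ := Nat.exists_eq_add_of_le hk
  rw [Nat.add_comm, List.replicate_succ', List.getLast?_append_cons]
  rfl

lemma pvMod0 (p n : Nat) (hp : 1 ≤ p) (hn : 1 ≤ n) (h : n % p = 0) :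
    (n - 1) % p = p - 1 ∧ (n - 1) / p = n / p - 1 ∧ 1 ≤ n / p := by
  have hd := Nat.div_add_mod n p
  set q := n / p with hqdef
  have hn' : n = p * q := by omega
  have hq1 : 1 ≤ q := by
    rcases Nat.eq_zero_or_pos q with h0 | h0
    · rw [h0, Nat.mul_zero] at hn'; omega
    · exact h0
  have he : n - 1 = p * (q - 1) + (p - 1) := by
    have hstep : p * q = p * (q - 1) + p := by
      conv_lhs => rw [show q = (q - 1) + 1 by omega]
      rw [Nat.mul_add, Nat.mul_one]
    omega
  refine ⟨?_, ?_, hq1⟩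
  · rw [he, Nat.mul_add_mod, Nat.mod_eq_of_lt (show p - 1 < p by omega)]
  · rw [he, Nat.mul_add_div (show 0 < p by omega),
        Nat.div_eq_of_lt (show p - 1 < p by omega)]
    omega

lemma pvModPos (p n : Nat) (hp : 1 ≤ p) (h : n % p ≠ 0) :
    (n - 1) % p = n % p - 1 ∧ (n - 1) / p = n / p := by
  have hd := Nat.div_add_mod n p
  have hlt : n % p < p := Nat.mod_lt _ (by omega)
  have he : n - 1 = p * (n / p) + (n % p - 1) := by omega
  constructor
  · rw [he, Nat.mul_add_mod, Nat.mod_eq_of_lt (show n % p - 1 < p by omega)]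
  · rw [he, Nat.mul_add_div (show 0 < p by omega),
        Nat.div_eq_of_lt (show n % p - 1 < p by omega)]
    omega

lemma pvDropTake (L : List Char) (j : Nat) (hj : j < L.length) :
    (L.drop j).take 1 = [L.getD j ' '] := by
  rw [List.drop_eq_getElem_cons hj]
  simp only [List.take_succ_cons, List.take_zero, List.getD_eq_getElem?_getD,
    List.getElem?_eq_getElem hj, Option.getD_some]

-- A's within-run invariant: consuming n more copies of c with current run replicate k c
-- emits the full letter every period presses and leaves the wrapped remainder as state.
lemma pvRunLemma (c : Char) (hc : c ∈ pvDigits) :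
    ∀ (n k : Nat) (res : List Char) (rest : List Char), 1 ≤ k → k ≤ pvP c →
    pvLoopA (List.replicate n c ++ rest) (List.replicate k c) res
      = pvLoopA rest (List.replicate ((k - 1 + n) % pvP c + 1) c)
          (res ++ (List.replicate ((k - 1 + n) / pvP c)
              (pvKeypadA.getD (List.replicate (pvP c) c) [])).flatten) := by
  intro n
  induction n with
  | zero =>
    intro k res rest h1 h2
    have h3 : k - 1 < pvP c := by omega
    have e1 : k - 1 + 0 = k - 1 := rfl
    rw [e1, Nat.mod_eq_of_lt h3, Nat.div_eq_of_lt h3, Nat.sub_add_cancel h1]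
    simp
  | succ n ih =>
    intro k res rest h1 h2
    have hp := pvBridgeP c hc
    rw [List.replicate_succ, List.cons_append]
    rw [pvLoopA]
    have hlast : PySem.List.pyGet? (List.replicate k c) (-1) = some c := by
      rw [PySem.List.pyGet?_neg_one, pvGetLastReplicate c k h1]
    have hsucc : List.replicate k c ++ [c] = List.replicate (k + 1) c :=
      (List.replicate_succ' ..).symm
    by_cases hkp : k = pvP c
    · -- run full: flush the letter, restart the run with this press
      have hnone : pvKeypadA.get? (List.replicate k c ++ [c]) = none := by
        rw [hsucc, pvBridgeNone c hc k (pvMemK k h1 (by omega))]; omega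
      rw [if_pos ⟨by simp; omega, Or.inr hnone⟩]
      have hih := ih 1 (res ++ pvKeypadA.getD (List.replicate k c) []) rest le_rfl hp.1
      have e2 : 1 - 1 + n = n := by omega
      rw [e2] at hih
      simp only [List.replicate_one] at hih
      rw [hih]
      have e1 : k - 1 + (n + 1) = pvP c + n := by omega
      rw [e1, Nat.add_comm (pvP c) n, Nat.add_mod_right, Nat.add_div_right _ (by omega)]
      congr 1
      rw [List.replicate_succ, List.flatten_cons, hkp, List.append_assoc]
    · -- run not full yet: extend the state
      have hsome : ¬ pvKeypadA.get? (List.replicate k c ++ [c]) = none := by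
        rw [hsucc, pvBridgeNone c hc k (pvMemK k h1 (by omega))]; omega
      rw [if_neg (by simp [hlast, hsome])]
      rw [hsucc, ih (k + 1) res rest (by omega) (by omega)]
      have e1 : k + 1 - 1 + n = k - 1 + (n + 1) := by omega
      rw [e1]

-- the output A accumulates for one whole maximal run equals B's arithmetic piece.
lemma pvRunEq (c : Char) (hc : c ∈ pvDigits) (n : Nat) (hn : 1 ≤ n) :
    (List.replicate ((n - 1) / pvP c) (pvKeypadA.getD (List.replicate (pvP c) c) [])).flatten
      ++ pvKeypadA.getD (List.replicate ((n - 1) % pvP c + 1) c) []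
    = pvRunPieces c n := by
  have hp := pvBridgeP c hc
  have hfull := pvBridgeEmit c hc (pvP c) (pvMemK _ hp.1 hp.2) le_rfl
  have hmlt : (n - 1) % pvP c < pvP c := Nat.mod_lt _ (by omega)
  have hrem := pvBridgeEmit c hc ((n - 1) % pvP c + 1) (pvMemK _ (by omega) (by omega)) (by omega)
  rw [hfull, hrem]
  show _ = (if (pvL c).isEmpty then [] else List.replicate (n / pvP c) ((pvL c).getLastD ' ')) ++
      (if n % pvP c ≠ 0 then [(pvL c).getD (n % pvP c - 1) ' '] else [])
  by_cases h0 : pvL c = []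
  · -- digit '1': no letters, period 1, nothing is ever emitted
    have hp1 : pvP c = 1 := by simp [pvP, h0]
    simp [h0, hp1, List.flatten_replicate_nil, Nat.mod_one]
  · -- ordinary digit: period = number of letters
    set L := pvL c with hLdef
    have hpos : 0 < L.length := List.length_pos_of_ne_nil h0
    have hlen : pvP c = L.length := by
      rw [pvP, ← hLdef]; exact Nat.max_eq_left (by omega)
    have hlastD : (L.drop (pvP c - 1)).take 1 = [L.getLastD ' '] := by
      rw [hlen, pvDropTake L (L.length - 1) (by omega)]
      congr 1
      rw [List.getD_eq_getElem?_getD, List.getLastD_eq_getLast?, List.getLast?_eq_getElem?]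
    rw [hlastD]
    have hflat : ∀ q : Nat, (List.replicate q [L.getLastD ' ']).flatten = List.replicate q (L.getLastD ' ') := by
      intro q; induction q with
      | zero => rfl
      | succ q _ => simp [List.replicate_succ]
    rw [hflat]
    rw [if_neg (by simpa [List.isEmpty_iff] using h0)]
    by_cases hr0 : n % pvP c = 0
    · obtain ⟨e1, e2, e3⟩ := pvMod0 (pvP c) n hp.1 hn hr0
      rw [e1, e2, hr0]
      have he : pvP c - 1 + 1 = pvP c := by omega
      rw [he, hlastD]
      simp only [ne_eq, not_true_eq_false, if_false]
      rw [List.append_nil, ← List.replicate_succ']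
      congr 1
      omega
    · obtain ⟨e1, e2⟩ := pvModPos (pvP c) n hp.1 hr0
      rw [e1, e2]
      have hrlt : n % pvP c - 1 < L.length := by omega
      have he : n % pvP c - 1 + 1 = n % pvP c := by omega
      rw [he, pvDropTake L (n % pvP c - 1) hrlt]
      rw [if_pos hr0]

lemma pvKpAEmpty : pvKeypadA.getD [] [] = [] := by decide

lemma pvDropWhileHead {α : Type} (p : α → Bool) : ∀ (t : List α) (d : α) (t' : List α),
    t.dropWhile p = d :: t' → p d = false := by
  intro t
  induction t with
  | nil => intro d t' h; simp [List.dropWhile] at h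
  | cons x xs ihx =>
    intro d t' h
    rw [List.dropWhile_cons] at h
    by_cases hx : p x = true
    · rw [if_pos hx] at h; exact ihx d t' h
    · rw [if_neg hx] at h
      injection h with h1 _
      rw [← h1]
      simpa using hx

-- main equivalence: A's state machine, started fresh, produces exactly B's run pieces.
lemma pvMain : ∀ l : List Char, (∀ c ∈ l, c ∈ pvDigits) → ∀ res : List Char,
    pvLoopA l [] res = res ++ pvLoopB l := by
  intro l
  induction l using pvLoopB.induct with
  | case1 =>
    intro _ res
    rw [pvLoopB]
    simp [pvLoopA, pvKpAEmpty]
  | case2 c t ih =>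
    intro hdig res
    have hc : c ∈ pvDigits := hdig c List.mem_cons_self
    have hp := pvBridgeP c hc
    set m := (t.takeWhile (· == c)).length with hm
    set rest := t.dropWhile (· == c) with hrest
    have htw : t.takeWhile (· == c) = List.replicate m c := by
      rw [List.eq_replicate_iff]
      exact ⟨rfl, fun b hb => by simpa using List.mem_takeWhile_imp hb⟩
    have hsplit : t = List.replicate m c ++ rest := by
      rw [← htw, hrest, List.takeWhile_append_dropWhile]
    have hsub : ∀ c' ∈ rest, c' ∈ pvDigits := by
      intro c' hc'
      exact hdig c' (List.mem_cons_of_mem _ ((List.dropWhile_sublist _).subset hc'))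
    -- first press: state was empty, no flush
    have step1 : pvLoopA (c :: t) [] res = pvLoopA t [c] res := by
      rw [pvLoopA]; simp
    have hrun := pvRunLemma c hc m 1 res rest le_rfl hp.1
    simp only [List.replicate_one, Nat.sub_self, Nat.zero_add] at hrun
    have hpiece := pvRunEq c hc (m + 1) (by omega)
    simp only [Nat.add_sub_cancel] at hpiece
    have hBeq : pvLoopB (c :: t) = pvRunPieces c (m + 1) ++ pvLoopB rest := by
      rw [pvLoopB, ← hm, ← hrest]
    rw [step1, hBeq, hsplit, hrun, ← hpiece]
    rcases hr : rest with _ | ⟨d, t'⟩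
    · -- end of input: final flush of the leftover run
      rw [pvLoopA, pvLoopB]
      simp [List.append_assoc]
    · -- next run starts with a different digit: flush, restart on d
      have hd : (d == c) = false := by
        apply pvDropWhileHead (· == c) t d t'
        rw [hrest] at hr; exact hr
      have hlast : PySem.List.pyGet? (List.replicate (m % pvP c + 1) c) (-1) = some c := by
        rw [PySem.List.pyGet?_neg_one, pvGetLastReplicate c _ (by omega)]
      rw [pvLoopA]
      rw [if_pos ⟨by simp, Or.inl (by rw [hlast]; intro hco; injection hco with h; rw [← h] at hd; simp at hd)⟩]
      have step2 : ∀ X : List Char, pvLoopA (d :: t') [] X = pvLoopA t' [d] X := by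
        intro X; rw [pvLoopA]; simp
      rw [← step2]
      have ih' := ih hsub
      rw [hr] at ih'
      rw [ih']
      simp [List.append_assoc]

-- ===== VERDICT (by name: the statement is the Claim_ definition above) =====
theorem keypad_string_spec : Claim_equal_keypad_string := by
  intro keys _ hpre
  have hdig : ∀ c ∈ keys.toList, c ∈ pvDigits := by
    intro c hc
    exact List.contains_iff_mem.mp (by simpa using List.all_eq_true.mp hpre c hc)
  show String.mk (pvLoopA keys.toList [] []) = String.mk (pvLoopB keys.toList)
  rw [pvMain keys.toList hdig []]
  rfl
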